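-- pv_equiv track=rewrite | github.com/SeppiaBrilla/AOC2024 | 09/day9_pt2.py | get_block_id
-- ===== SOURCE A (Python) =====
-- def get_block_id(blocks:list[int]) -> list[str]:
--     ids = []
--     is_file = True
--     id = 0
--     for _ in blocks:
--         if is_file:
--             is_file = False
--             ids += [str(id)]
--             id += 1
--         else:
--             is_file = True
--             ids += ['.']
--     return ids
-- ===== SOURCE B (Python) =====
-- def get_block_id(blocks: list[int]) -> list[str]:
--     n = len(blocks)
--     out = []
--     for k in range(n // 2):          # one full (file, gap) pair per iteration
--         out.append(str(k))
--         out.append('.')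
--     if n % 2 == 1:                   # trailing lone file block
--         out.append(str(n // 2))
--     return out
-- ===== Notes on version B (the rewrite author's own statement) =====
-- stated objective: simpler
-- what changed: Replaces the per-element toggle/counter loop with a pairwise decomposition: one loop iteration per full (file, gap) pair (n//2 iterations emitting two entries each) plus a trailing lone file when the length is odd; no boolean flag or id accumulator is maintained.
import Mathlib
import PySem

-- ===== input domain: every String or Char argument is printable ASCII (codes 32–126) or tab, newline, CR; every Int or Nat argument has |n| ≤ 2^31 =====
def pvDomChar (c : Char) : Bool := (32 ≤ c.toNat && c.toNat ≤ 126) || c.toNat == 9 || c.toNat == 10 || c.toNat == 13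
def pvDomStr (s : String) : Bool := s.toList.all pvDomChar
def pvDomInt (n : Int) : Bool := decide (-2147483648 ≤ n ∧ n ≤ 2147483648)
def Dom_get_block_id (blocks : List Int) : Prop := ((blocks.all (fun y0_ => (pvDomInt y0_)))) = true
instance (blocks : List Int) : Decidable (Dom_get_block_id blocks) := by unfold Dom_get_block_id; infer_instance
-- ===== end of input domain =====

-- B replaces A's per-element toggle/counter loop with a pairwise decomposition:
-- n//2 iterations each emitting a full (file, gap) pair, plus a trailing lone file
-- when the length is odd (objective: simpler).

-- ===== PORT A =====
-- literal transliteration of A: a fold over the elements carrying (ids, is_file, id)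
def get_block_id (blocks : List Int) : List String :=
  (blocks.foldl
    (fun (st : List String × Bool × Int) (_ : Int) =>
      if st.2.1 then (st.1 ++ [PySem.Int.toStr st.2.2], (false, st.2.2 + 1))
      else (st.1 ++ ["."], (true, st.2.2)))
    (([] : List String), (true, (0 : Int)))).1

-- ===== PORT B =====
-- literal transliteration of B: loop k over range(n // 2) appending str(k) and '.',
-- then append str(n // 2) if n is odd
def get_block_id_alt (blocks : List Int) : List String :=
  let n := blocks.length
  let out := (PySem.List.pyRange 0 ((n / 2 : Nat) : Int) 1).foldl
      (fun out k => out ++ [PySem.Int.toStr k] ++ ["."]) []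
  if n % 2 = 1 then out ++ [PySem.Int.toStr ((n / 2 : Nat) : Int)] else out

-- ===== PRECONDITION & SPEC =====
def Spec_get_block_id (blocks : List Int) (out : List String) : Prop := out = get_block_id_alt blocks
instance (blocks : List Int) (out : List String) : Decidable (Spec_get_block_id blocks out) := by unfold Spec_get_block_id; infer_instance

-- ===== CLAIM (what is proved, stated in full; the proofs are below) =====
def Claim_equal_get_block_id : Prop := ∀ (blocks : List Int), Dom_get_block_id blocks → Spec_get_block_id blocks (get_block_id blocks)

-- ===== LEMMAS AND PROOFS =====

-- closed form of the entry at index i when A's loop starts with flag b and counter id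
def pvEntry (b : Bool) (id : Int) (i : Nat) : String :=
  if (decide (i % 2 = 0)) == b then PySem.Int.toStr (id + ((i / 2 : Nat) : Int)) else "."

lemma pvEntry_shift_true (id : Int) (i : Nat) :
    pvEntry true id (i + 1) = pvEntry false (id + 1) i := by
  unfold pvEntry
  by_cases h : i % 2 = 0
  · have h1 : (i + 1) % 2 = 1 := by omega
    simp [h, h1]
  · have h0 : (i + 1) % 2 = 0 := by omega
    have h2 : (i + 1) / 2 = i / 2 + 1 := by omega
    simp [h, h0, h2]
    congr 1
    ring

lemma pvEntry_shift_false (id : Int) (i : Nat) :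
    pvEntry false id (i + 1) = pvEntry true id i := by
  unfold pvEntry
  by_cases h : i % 2 = 0
  · have h1 : (i + 1) % 2 = 1 := by omega
    have h2 : (i + 1) / 2 = i / 2 := by omega
    simp [h, h1, h2]
  · have h0 : (i + 1) % 2 = 0 := by omega
    simp [h, h0]

-- loop invariant: A's fold, from any state, appends the closed-form entries
lemma fold_inv (blocks : List Int) : ∀ (acc : List String) (b : Bool) (id : Int),
    (blocks.foldl
      (fun (st : List String × Bool × Int) (_ : Int) =>
        if st.2.1 then (st.1 ++ [PySem.Int.toStr st.2.2], (false, st.2.2 + 1))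
        else (st.1 ++ ["."], (true, st.2.2)))
      (acc, (b, id))).1
    = acc ++ (List.range blocks.length).map (pvEntry b id) := by
  induction blocks with
  | nil => intro acc b id; simp
  | cons h t ih =>
    intro acc b id
    cases b
    · simp only [List.foldl_cons, if_neg (by simp : ¬ ((false : Bool) = true))]
      rw [ih]
      rw [List.length_cons, List.range_succ_eq_map]
      simp only [List.map_cons, List.map_map]
      have hfun : (pvEntry false id ∘ Nat.succ) = pvEntry true id := by
        funext i; exact pvEntry_shift_false id i
      rw [hfun]
      have h0 : pvEntry false id 0 = "." := by unfold pvEntry; simp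
      rw [h0]
      simp
    · simp only [List.foldl_cons, if_pos]
      rw [ih]
      rw [List.length_cons, List.range_succ_eq_map]
      simp only [List.map_cons, List.map_map]
      have hfun : (pvEntry true id ∘ Nat.succ) = pvEntry false (id + 1) := by
        funext i; exact pvEntry_shift_true id i
      rw [hfun]
      have h0 : pvEntry true id 0 = PySem.Int.toStr id := by unfold pvEntry; simp
      rw [h0]
      simp

-- B's pair loop over range(m) produces the first 2*m closed-form entries
lemma pair_fold (m : Nat) :
    ((List.range m).map (fun k => (Nat.cast k : Int))).foldl
      (fun out k => out ++ [PySem.Int.toStr k] ++ ["."]) []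
    = (List.range (2 * m)).map (pvEntry true 0) := by
  induction m with
  | zero => simp
  | succ m ih =>
    rw [List.range_succ, List.map_append, List.foldl_append, ih]
    have h2 : 2 * (m + 1) = (2 * m + 1) + 1 := by ring
    rw [h2, List.range_succ, List.range_succ]
    have e1 : pvEntry true 0 (2 * m) = PySem.Int.toStr (Nat.cast m : Int) := by
      unfold pvEntry
      have hm : (2 * m) % 2 = 0 := by omega
      have hd : (2 * m) / 2 = m := by omega
      simp [hm, hd]
    have e2 : pvEntry true 0 (2 * m + 1) = "." := by
      unfold pvEntry
      have hm : (2 * m + 1) % 2 = 1 := by omega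
      simp [hm]
    simp [e1, e2]

lemma alt_eq (blocks : List Int) :
    get_block_id_alt blocks = (List.range blocks.length).map (pvEntry true 0) := by
  unfold get_block_id_alt
  simp only [PySem.List.pyRange_zero_natCast]
  rw [pair_fold]
  set n := blocks.length with hn
  by_cases hodd : n % 2 = 1
  · have hsplit : n = (2 * (n / 2)) + 1 := by omega
    rw [if_pos hodd]
    conv_rhs => rw [hsplit, List.range_succ]
    have e : pvEntry true 0 (2 * (n / 2)) = PySem.Int.toStr ((n / 2 : Nat) : Int) := by
      unfold pvEntry
      have hm : (2 * (n / 2)) % 2 = 0 := by omega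
      have hd : (2 * (n / 2)) / 2 = n / 2 := by omega
      simp [hm, hd]
    rw [List.map_append, List.map_cons, List.map_nil, e]
  · have hsplit : n = 2 * (n / 2) := by omega
    rw [if_neg hodd]
    conv_rhs => rw [hsplit]

-- ===== VERDICT (by name: the statement is the Claim_ definition above) =====
theorem get_block_id_spec : Claim_equal_get_block_id := by
  intro blocks _
  unfold Spec_get_block_id get_block_id
  rw [fold_inv, alt_eq]
  simp
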